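-- pv_equiv track=rewrite | github.com/htranhp1213/RAG-glaucoma | run_rag_eval.py | trim_contexts
-- ===== SOURCE A (Python) =====
-- from typing import Any, Dict, List
--
-- def trim_contexts(contexts: List[str], max_chars: int) -> str:
--     """
--     Join contexts while keeping total prompt size manageable.
--     """
--     joined_parts: List[str] = []
--     total = 0
--
--     for i, ctx in enumerate(contexts, start=1):
--         piece = f"[Context {i}]\n{ctx.strip()}\n\n"
--         if total + len(piece) > max_chars:
--             break
--         joined_parts.append(piece)
--         total += len(piece)
--
--     return "".join(joined_parts).strip()
-- ===== SOURCE B (Python) =====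
-- def trim_contexts(contexts, max_chars):
--     # Two-stage: build all pieces, then select the maximal prefix whose
--     # cumulative length stays within the budget (cumulative totals are
--     # nondecreasing, so counting the in-budget totals gives the cut point).
--     pieces = ["[Context %d]\n%s\n\n" % (i, c.strip()) for i, c in enumerate(contexts, 1)]
--     cums = []
--     run = 0
--     for p in pieces:
--         run += len(p)
--         cums.append(run)
--     k = sum(1 for c in cums if c <= max_chars)
--     return "".join(pieces[:k]).strip()
-- ===== Notes on version B (the rewrite author's own statement) =====
-- stated objective: alternative
-- what changed: Replaces A's single pass with early break by a build-all-pieces / cumulative-totals / count-the-in-budget-prefix pipeline and a final slice-and-join.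
import Mathlib
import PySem

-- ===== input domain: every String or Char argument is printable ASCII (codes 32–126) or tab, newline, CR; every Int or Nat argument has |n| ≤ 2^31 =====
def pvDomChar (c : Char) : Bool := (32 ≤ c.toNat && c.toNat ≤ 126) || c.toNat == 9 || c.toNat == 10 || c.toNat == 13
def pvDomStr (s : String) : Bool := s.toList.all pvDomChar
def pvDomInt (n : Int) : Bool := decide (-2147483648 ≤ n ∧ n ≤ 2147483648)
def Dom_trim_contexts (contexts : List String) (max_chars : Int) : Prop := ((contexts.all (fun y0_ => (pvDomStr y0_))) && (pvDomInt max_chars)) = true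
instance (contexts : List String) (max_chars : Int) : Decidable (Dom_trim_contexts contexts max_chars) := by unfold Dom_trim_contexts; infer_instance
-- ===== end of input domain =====

-- B selects the maximal in-budget prefix by counting cumulative totals instead of A's early-break loop; return values agree everywhere.

-- ===== PORT A =====
-- piece = f"[Context {i}]\n{ctx.strip()}\n\n"  (shared by both ports; identical expression in both Pythons)
def pvPiece (i : Int) (ctx : String) : String :=
  "[Context " ++ PySem.Int.toStr i ++ "]\n" ++ PySem.Str.strip ctx ++ "\n\n"

-- the for-loop of A: walks enumerate(contexts, 1), accumulating joined_parts and total, breaking when over budget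
def pvALoop (max_chars : Int) : List (Int × String) → Int → List String → List String
  | [], _, acc => acc
  | (i, ctx) :: rest, total, acc =>
    let piece := pvPiece i ctx
    if total + PySem.Str.len piece > max_chars then acc
    else pvALoop max_chars rest (total + PySem.Str.len piece) (acc ++ [piece])

def trim_contexts (contexts : List String) (max_chars : Int) : String :=
  PySem.Str.strip (PySem.Str.join "" (pvALoop max_chars (PySem.List.enumerate contexts 1) 0 []))

-- ===== PORT B =====
def trim_contexts_alt (contexts : List String) (max_chars : Int) : String :=
  let pieces := (PySem.List.enumerate contexts 1).map (fun p => pvPiece p.1 p.2)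
  let cums := (pieces.foldl (fun (st : Int × List Int) p =>
      (st.1 + PySem.Str.len p, st.2 ++ [st.1 + PySem.Str.len p])) (0, [])).2
  let k := cums.countP (fun c => decide (c ≤ max_chars))
  PySem.Str.strip (PySem.Str.join "" (PySem.List.slice pieces none (some (k : Int))))

-- ===== PRECONDITION & SPEC =====
def Spec_trim_contexts (contexts : List String) (max_chars : Int) (out : String) : Prop := out = trim_contexts_alt contexts max_chars
instance (contexts : List String) (max_chars : Int) (out : String) : Decidable (Spec_trim_contexts contexts max_chars out) := by unfold Spec_trim_contexts; infer_instance

-- ===== CLAIM (what is proved, stated in full; the proofs are below) =====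
def Claim_equal_trim_contexts : Prop := ∀ (contexts : List String) (max_chars : Int), Dom_trim_contexts contexts max_chars → Spec_trim_contexts contexts max_chars (trim_contexts contexts max_chars)

-- ===== LEMMAS AND PROOFS =====

-- the kept prefix, abstracted over the piece strings and the running total
def pvKeep (max_chars : Int) : List String → Int → List String
  | [], _ => []
  | p :: rest, t =>
    if t + PySem.Str.len p > max_chars then []
    else p :: pvKeep max_chars rest (t + PySem.Str.len p)

-- cumulative totals starting from r
def pvCums : List String → Int → List Int
  | [], _ => []
  | p :: rest, r => (r + PySem.Str.len p) :: pvCums rest (r + PySem.Str.len p)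

theorem pvALoop_eq_keep (max_chars : Int) (ps : List (Int × String)) (t : Int) (acc : List String) :
    pvALoop max_chars ps t acc = acc ++ pvKeep max_chars (ps.map (fun p => pvPiece p.1 p.2)) t := by
  induction ps generalizing t acc with
  | nil => simp [pvALoop, pvKeep]
  | cons hd rest ih =>
    obtain ⟨i, ctx⟩ := hd
    simp only [pvALoop, List.map_cons, pvKeep]
    split_ifs with h
    · simp
    · rw [ih]; simp

theorem pvCums_ge (qs : List String) (r : Int) : ∀ c ∈ pvCums qs r, r ≤ c := by
  induction qs generalizing r with
  | nil => simp [pvCums]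
  | cons p rest ih =>
    intro c hc
    have hlen : (0 : Int) ≤ PySem.Str.len p := by
      simp [PySem.Str.len_eq]
    simp only [pvCums, List.mem_cons] at hc
    rcases hc with rfl | hc
    · omega
    · have := ih (r + PySem.Str.len p) c hc; omega

theorem pvCountP_cums_zero (max_chars : Int) (qs : List String) (r : Int)
    (h : max_chars < r) : (pvCums qs r).countP (fun c => decide (c ≤ max_chars)) = 0 := by
  rw [List.countP_eq_zero]
  intro c hc
  have := pvCums_ge qs r c hc
  simp; omega

theorem pvTake_countP_eq_keep (max_chars : Int) (qs : List String) (r : Int) :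
    qs.take ((pvCums qs r).countP (fun c => decide (c ≤ max_chars))) = pvKeep max_chars qs r := by
  induction qs generalizing r with
  | nil => simp [pvCums, pvKeep]
  | cons p rest ih =>
    simp only [pvCums, pvKeep, List.countP_cons]
    by_cases h : r + PySem.Str.len p > max_chars
    · have h1 : ¬ (r + PySem.Str.len p ≤ max_chars) := by omega
      rw [pvCountP_cums_zero max_chars rest _ (by omega)]
      simp only [decide_eq_true_eq]
      rw [if_neg h1, if_pos h]
      simp
    · have h1 : (r + PySem.Str.len p ≤ max_chars) := by omega
      simp only [decide_eq_true_eq]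
      rw [if_pos h1, if_neg h, List.take_succ_cons]
      rw [ih]

theorem pvFoldl_cums (qs : List String) (r : Int) (l : List Int) :
    (qs.foldl (fun (st : Int × List Int) p =>
      (st.1 + PySem.Str.len p, st.2 ++ [st.1 + PySem.Str.len p])) (r, l)).2 = l ++ pvCums qs r := by
  induction qs generalizing r l with
  | nil => simp [pvCums]
  | cons p rest ih =>
    simp only [List.foldl_cons, pvCums]
    rw [ih]
    simp

-- ===== VERDICT (by name: the statement is the Claim_ definition above) =====
theorem trim_contexts_spec : Claim_equal_trim_contexts := by
  intro contexts max_chars _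
  unfold Spec_trim_contexts
  dsimp only [trim_contexts, trim_contexts_alt]
  rw [pvALoop_eq_keep, pvFoldl_cums]
  rw [PySem.List.slice_to_natCast]
  simp only [List.nil_append]
  rw [pvTake_countP_eq_keep]
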